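/- PORTED by tools/port_fixed.py from Prog/Jsmn/D/StrTok.lean to THE FIXED IMAGE fixed/jsmn_d.bin (same bytes at the same addresses; binFD). Do not edit: edit the original and port again. -/
/-
  jsmn_d.bin, `jsmn_parse_string`: after `call jsmn_alloc_token` (100165H) — NULL → JSMN_ERROR_NOMEM, `pos = start`; otherwise
  `jsmn_fill_token(token, JSMN_STRING, start + 1, pos)` through its contract and `return 0`.
-/
import Prog.Jsmn.Fixed.Specs
import Prog.Jsmn.Fixed.CodeFD
import Prog.Jsmn.Fixed.D.StrInv
namespace X86
namespace J6
namespace FD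
namespace Str
open X86.User (CodeAt RegsKept Span FlagsOK Layout toNat_add_ofNat toNat_ofNat_lt' add_ofNat_add)
open Jsmn JsmnFDBytes

set_option maxRecDepth 100000
set_option maxHeartbeats 4000000
set_option linter.unusedSimpArgs false
set_option linter.unusedVariables false

variable {c : SCtx} {n : User.Layout} {v0 v : User.State}

/-- `start + 1` converted to `int`, as the 32-bit pattern handed to jsmn_fill_token. -/
theorem u32_i32_succ (x : Nat) : u32 (i32 (i32 (x : Int) + 1)) = (x + 1) % 4294967296 := by unfold u32 i32; omega
/-- `parser->pos` converted to `int`, as a 32-bit pattern. -/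
theorem u32_i32_nat (x : Nat) : u32 (i32 (x : Int)) = x % 4294967296 := by unfold u32 i32; omega

/-- 100165H with rax = NULL: `parser->pos = start; return JSMN_ERROR_NOMEM`. -/
theorem alloc_null (he : Entry c n v0) {q : Nat} {ts0 ts : Tokens} (hrip : v.rip = 0x100165) (hs : c.toks = some ts0)
    (hf_core : Core c n v0 v { c.p with pos := q } (some ts))
    (hrax : v.reg .rax = 0) (hrbx : v.reg .rbx = c.pa) (hrbp : v.reg .rbp = UInt64.ofNat c.p.pos) :
    Reach n v (fun v' => AtRet c n v0 v' JSMN_ERROR_NOMEM c.p (some ts)) := by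
  obtain ⟨hp, hr8⟩ := he
  v3_open hp hf_core
  have hp_env_toksR_hi := hp.toksW.hi
  have hp_env_toksR_img := hp.toksW.img
  have hp_env_toksR_stk := hp.toksW.stk
  j6f_bin
  str_some_f
  have hp_env_toksR_lo := (hp.env.toksR.resolve_left htb0).lo
  have hpos : c.p.pos < 2 ^ 32 := hp_parser_pos ▸ User.Mem.readLE4_lt _ _
  have hlowp : Word.low .w32 (UInt64.ofNat c.p.pos) = UInt64.ofNat c.p.pos :=
    Word.low_of_lt _ (by show (UInt64.ofNat c.p.pos).toNat < 2 ^ 32; v3_omega)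
  v3_walk hf_core_code hp.call.fetch [hlowp] until [0x10019d]
  refine Reach.done ⟨by simp, ⟨by (v3_regnorm; exact hf_core_rsp), by v3_kept, by v3_frame hf_core_svbp, by v3_frame hf_core_svbx, by v3_frame hf_core_retA,
      by (simp only [dataWins, SCtx.tlen, hs, toksBytes, tokSize_default]; v3_same), by v3_frame hf_core_code,
      ⟨by v3_read, by v3_frame hf_core_parser_toknext, by v3_frame hf_core_parser_toksuper⟩, ⟨htb0, htslen, by v3_frame htoks⟩⟩,
    by (v3_regnorm; exact u32_nomem.symm)⟩

/-- 10017CH (after `call jsmn_fill_token`): `return 0`. -/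
theorem fill_ret (he : Entry c n v0) {pp : Parser} {tk : Option Tokens} (hrip : v.rip = 0x10017c) (hc : Core c n v0 v pp tk) :
    Reach n v (fun v' => AtRet c n v0 v' 0 pp tk) := by
  obtain ⟨hp, hr8⟩ := he
  v3_open hp hc
  have hp_env_toksR_hi := hp.toksW.hi
  have hp_env_toksR_img := hp.toksW.img
  have hp_env_toksR_stk := hp.toksW.stk
  j6f_bin
  v3_walk hc_code hp.call.fetch [] until [0x10019d]
  exact Reach.done ⟨by simp, ⟨by (v3_regnorm; exact hc_rsp), by v3_kept, by (v3_memnorm; exact hc_svbp), by (v3_memnorm; exact hc_svbx),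
    by (v3_memnorm; exact hc_retA), by (v3_memnorm; exact hc_same), by (v3_memnorm; exact hc_code), by (v3_memnorm; exact hc.parser),
    by (v3_memnorm; exact hc_toksArg)⟩, by (v3_regnorm; rfl)⟩

/-- 100165H with rax = &tokens[i]: `jsmn_fill_token(token, JSMN_STRING, start + 1, parser->pos)`, `return 0`. -/
theorem alloc_some (hfill : FillSpec binFD n) (he : Entry c n v0) {q i : Nat} {pp : Parser} {ts0 ts : Tokens} (hrip : v.rip = 0x100165)
    (hs : c.toks = some ts0) (hf_core : Core c n v0 v pp (some ts)) (hq : pp.pos = q) (hi : i < c.numTokens)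
    (hrax : v.reg .rax = tokAddr Config.default c.tb i) (hrbx : v.reg .rbx = c.pa) (hrbp : v.reg .rbp = UInt64.ofNat c.p.pos) :
    Reach n v (fun v' => AtRet c n v0 v' 0 pp (some (ts.set i (fillToken (ts.getD i default) JSMN_STRING (i32 (i32 c.p.pos + 1)) (i32 q))))) := by
  obtain ⟨hp, hr8⟩ := he
  v3_open hp hf_core
  have hp_env_toksR_hi := hp.toksW.hi
  have hp_env_toksR_img := hp.toksW.img
  have hp_env_toksR_stk := hp.toksW.stk
  j6f_bin
  str_some_f
  have hp_env_toksR_lo := (hp.env.toksR.resolve_left htb0).lo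
  have hpos : c.p.pos < 2 ^ 32 := hp_parser_pos ▸ User.Mem.readLE4_lt _ _
  have hq32 : pp.pos < 2 ^ 32 := hf_core_parser_pos ▸ User.Mem.readLE4_lt _ _
  have hlowp : Word.low .w32 (UInt64.ofNat c.p.pos) = UInt64.ofNat c.p.pos :=
    Word.low_of_lt _ (by show (UInt64.ofNat c.p.pos).toNat < 2 ^ 32; v3_omega)
  have hmul := tokSize_mul_le Config.default hi
  rw [tokSize_default] at hmul
  have haddr : tokAddr Config.default c.tb i = c.tb + UInt64.ofNat (16 * i) := by unfold tokAddr; rw [tokSize_default]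
  rw [haddr] at hrax
  have himg : CodeAt v.mem 0x100000 binFD.image := by v3_frame hp.call.img
  v3_walk hf_core_code hp.call.fetch [hlowp] until [0x10019d]
  -- right after `call jsmn_fill_token`
  have hu1 : Word.low .w32 (Word.low .w32 (UInt64.ofNat c.p.pos + 1)) = UInt64.ofNat (u32 (i32 (i32 (c.p.pos : Int) + 1))) := by
    rw [u32_i32_succ]; v3_omega
  have hu2 : Word.low .w32 (Word.low .w32 (UInt64.ofNat pp.pos)) = UInt64.ofNat (u32 (i32 (q : Int))) := by
    rw [← hq, u32_i32_nat]; v3_omega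
  refine Reach.trans (hfill _ 0x10017c c.tb ts i JSMN_STRING (i32 (i32 (c.p.pos : Int) + 1)) (i32 (q : Int)) ?pre) ?_
  case pre =>
    refine ⟨by show CallPre n 0x100000 binFD.image 0x100076 0 0x10017c _; v3_callpre himg hp.call,
      by show _ = tokAddr Config.default _ _; rw [haddr]; v3_regnorm, by v3_regnorm; rfl, by v3_regnorm; exact hu1, by v3_regnorm; exact hu2, by decide,
      i32_range _, i32_range _, htslen ▸ hi, by show TokensAt Config.default _ _ _; v3_frame htoks, ⟨hp_env_toksR_lo, ?_, ?_, ?_⟩⟩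
    all_goals j6f_bin
    all_goals first | v3_omega | (v3_regnorm; v3_omega)
  intro v1 hpost
  obtain ⟨hpost1, hres⟩ := hpost
  v3_open hpost1
  have hk := hpost1.kept
  v3_viewnorm [X86.J6.dataWins, X86.J6.binFD_cfg, X86.J6.tokSize_default, X86.J6.links_default] at hpost1_rsp hpost1_same hres
  have hlen' : (ts.set i (fillToken (ts.getD i default) JSMN_STRING (i32 (i32 (c.p.pos : Int) + 1)) (i32 (q : Int)))).length = c.numTokens := by
    rw [List.length_set]; exact htslen
  exact fill_ret ⟨hp, hr8⟩ hpost1_rip ⟨hpost1_rsp, RegsKept.trans (by v3_kept) (hk.mono (by v3_regs_sub)),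
    by v3_frame hf_core_svbp, by v3_frame hf_core_svbx, by v3_frame hf_core_retA,
    by (simp only [dataWins, SCtx.tlen, hs, toksBytes, tokSize_default]; v3_same), by v3_frame hcodeW,
    by v3_frame hf_core.parser, ⟨htb0, hlen', hres⟩⟩

end Str
end FD
end J6
end X86
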